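-- pv_equiv track=rewrite | github.com/cjdevito11/TournamentBot | services/bracket_service.py | seeded_positions
-- ===== SOURCE A (Python) =====
-- def seeded_positions(n: int) -> list[int]:
--     """
--     Standard tournament seed positions list (length n, n is power of two).
--     Example n=8 => [1,8,4,5,2,7,3,6]
--     """
--     if n <= 1:
--         return [1]
--     if n == 2:
--         return [1, 2]
--     prev = seeded_positions(n // 2)
--     out: list[int] = []
--     for s in prev:
--         out.append(s)
--         out.append(n + 1 - s)
--     return out
-- ===== SOURCE B (Python) =====
-- def seeded_positions(n: int) -> list[int]:
--     # Iterative bottom-up: record the sizes the halving passes through,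
--     # then expand from the base case smallest-size-first.
--     sizes = []
--     m = n
--     while m > 2:
--         sizes.append(m)
--         m //= 2
--     res = [1] if m <= 1 else [1, 2]
--     while sizes:
--         m2 = sizes.pop()
--         new = []
--         for s in res:
--             new.append(s)
--             new.append(m2 + 1 - s)
--         res = new
--     return res
-- ===== Notes on version B (the rewrite author's own statement) =====
-- stated objective: alternative
-- what changed: Replaces the top-down recursion by an explicit iterative pass: a stack of halved sizes is collected first, then the list is expanded bottom-up from the base case.
import Mathlib
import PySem

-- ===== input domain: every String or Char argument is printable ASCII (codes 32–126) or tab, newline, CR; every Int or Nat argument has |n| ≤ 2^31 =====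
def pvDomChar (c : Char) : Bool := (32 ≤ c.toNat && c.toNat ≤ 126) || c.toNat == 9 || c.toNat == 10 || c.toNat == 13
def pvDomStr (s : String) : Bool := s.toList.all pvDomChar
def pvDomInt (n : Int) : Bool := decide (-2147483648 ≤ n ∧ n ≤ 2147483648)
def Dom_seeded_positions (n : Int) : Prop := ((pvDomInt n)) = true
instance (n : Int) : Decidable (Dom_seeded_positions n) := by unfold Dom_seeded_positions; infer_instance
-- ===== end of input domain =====

-- B replaces A's top-down recursion by an iterative bottom-up expansion over an explicit stack of sizes (alternative decomposition, same cost).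


-- used by the ports' termination proofs (cited in decreasing_by)
theorem pvHalf_toNat_lt (n : Int) (h1 : ¬ n ≤ 1) (h2 : ¬ n = 2) :
    (PySem.Int.floordiv n 2).toNat < n.toNat := by
  rw [PySem.Int.floordiv_eq_ediv_of_pos (by omega)]
  omega

-- ===== PORT A =====
def seeded_positions (n : Int) : List Int :=
  if h1 : n ≤ 1 then [1]
  else if h2 : n = 2 then [1, 2]
  else
    (seeded_positions (PySem.Int.floordiv n 2)).foldl
      (fun out s => out ++ [s, n + 1 - s]) []
termination_by n.toNat
decreasing_by exact pvHalf_toNat_lt n h1 h2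

-- ===== PORT B =====
-- first while-loop of Source B: collect the sizes visited, and the final (base) value of m
def pvCollect (m : Int) : List Int × Int :=
  if h : m > 2 then
    let r := pvCollect (PySem.Int.floordiv m 2)
    (m :: r.1, r.2)
  else ([], m)
termination_by m.toNat
decreasing_by exact pvHalf_toNat_lt m (by omega) (by omega)

-- inner for-loop of Source B: expand res for size m2
def pvExpand (m2 : Int) (res : List Int) : List Int :=
  res.foldl (fun new s => new ++ [s, m2 + 1 - s]) []

def seeded_positions_alt (n : Int) : List Int :=
  let c := pvCollect n
  let base : List Int := if c.2 ≤ 1 then [1] else [1, 2]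
  -- popping the stack from the end = right fold over the collected sizes
  c.1.foldr pvExpand base

-- ===== PRECONDITION & SPEC =====
def Spec_seeded_positions (n : Int) (out : List Int) : Prop := out = seeded_positions_alt n
instance (n : Int) (out : List Int) : Decidable (Spec_seeded_positions n out) := by unfold Spec_seeded_positions; infer_instance

-- ===== CLAIM (what is proved, stated in full; the proofs are below) =====
def Claim_equal_seeded_positions : Prop := ∀ (n : Int), Dom_seeded_positions n → Spec_seeded_positions n (seeded_positions n)

-- ===== LEMMAS AND PROOFS =====

theorem alt_unfold (n : Int) :
    seeded_positions_alt n =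
      if n ≤ 1 then [1]
      else if n = 2 then [1, 2]
      else pvExpand n (seeded_positions_alt (PySem.Int.floordiv n 2)) := by
  by_cases h1 : n ≤ 1
  · simp only [seeded_positions_alt, if_pos h1]
    rw [pvCollect, dif_neg (by omega : ¬ n > 2)]
    simp [h1]
  · by_cases h2 : n = 2
    · subst h2
      simp only [seeded_positions_alt]
      rw [pvCollect]
      norm_num
    · simp only [if_neg h1, if_neg h2, seeded_positions_alt]
      rw [pvCollect, dif_pos (by omega : n > 2)]
      rfl

theorem eq_aux (k : Nat) : ∀ n : Int, n.toNat ≤ k → seeded_positions n = seeded_positions_alt n := by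
  induction k with
  | zero =>
    intro n hn
    have h1 : n ≤ 1 := by omega
    rw [seeded_positions, alt_unfold, dif_pos h1, if_pos h1]
  | succ k ih =>
    intro n hn
    by_cases h1 : n ≤ 1
    · rw [seeded_positions, alt_unfold, dif_pos h1, if_pos h1]
    · by_cases h2 : n = 2
      · rw [seeded_positions, alt_unfold, dif_neg h1, dif_pos h2, if_neg h1, if_pos h2]
      · rw [seeded_positions, alt_unfold, dif_neg h1, dif_neg h2, if_neg h1, if_neg h2]
        have := pvHalf_toNat_lt n h1 h2
        rw [ih (PySem.Int.floordiv n 2) (by omega)]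
        rfl

-- ===== VERDICT (by name: the statement is the Claim_ definition above) =====
theorem seeded_positions_spec : Claim_equal_seeded_positions := by
  intro n _
  exact eq_aux n.toNat n le_rfl
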